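-- pv_equiv track=rewrite | github.com/emmi-kaplan/Practice | practice_old.py | find_proteins
-- ===== SOURCE A (Python) =====
-- NamedRegion = tuple[str, int, int]
--
-- Gene = NamedRegion
--
-- Protein = NamedRegion
--
-- def find_proteins(genes: list[Gene]) -> list[Protein]:
--     """
--     :param genes: List of (region_name, start_index, end_index)
--     :returns proteins: List of (protein_name, start_index, end_index)
--     """
--
--     protein_list = []
--     for gene in genes:
--         protein_list.append(gene)
--
--     for i in protein_list:
--         end_index = i[2]
--
--         for x in genes:
--             start_index = x[1]
--
--             if start_index == end_index:
--                 name = i[0] + "_" + x[0]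
--                 new_protein = NamedRegion([name, i[1], x[2]])
--                 protein_list.append(new_protein)
--
--     return protein_list
-- ===== SOURCE B (Python) =====
-- def find_proteins(genes):
--     """Level-synchronous chain expansion: grow whole generations at once
--     instead of scanning a self-extending worklist (same output order)."""
--     result = list(genes)
--     frontier = list(genes)
--     while frontier:
--         frontier = [(i[0] + "_" + x[0], i[1], x[2])
--                     for i in frontier for x in genes if x[1] == i[2]]
--         result += frontier
--     return result
-- ===== Notes on version B (the rewrite author's own statement) =====
-- stated objective: alternative
-- what changed: A scans a single self-extending worklist (appending chained proteins to the very list it is iterating over); B expands whole generations level-synchronously, rebuilding a fresh frontier per round and concatenating it to the result, which yields the identical output order.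
import Mathlib
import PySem

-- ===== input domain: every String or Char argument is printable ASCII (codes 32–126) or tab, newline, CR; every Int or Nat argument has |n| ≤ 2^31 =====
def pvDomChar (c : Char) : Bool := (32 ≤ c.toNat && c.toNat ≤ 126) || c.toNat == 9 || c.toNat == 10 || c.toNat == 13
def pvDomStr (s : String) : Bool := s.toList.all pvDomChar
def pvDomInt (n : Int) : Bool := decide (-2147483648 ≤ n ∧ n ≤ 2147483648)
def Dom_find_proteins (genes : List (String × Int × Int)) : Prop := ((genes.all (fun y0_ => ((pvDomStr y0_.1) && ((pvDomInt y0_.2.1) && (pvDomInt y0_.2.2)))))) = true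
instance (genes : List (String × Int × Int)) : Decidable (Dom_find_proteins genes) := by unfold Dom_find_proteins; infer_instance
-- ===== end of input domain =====

-- B replaces A's self-extending worklist scan by level-synchronous frontier expansion (same output, same order); objective: alternative decomposition, not speed.

-- ===== PORT A =====
-- A iterates over protein_list while appending to it; ported as a fuel-driven
-- queue recursion: protein_list = acc ++ queue at every step, one fuel per
-- processed element.  Fuel (n+1)^(n+2) is proved sufficient under Pre_.
def goA (genes : List (String × Int × Int)) :
    Nat → List (String × Int × Int) → List (String × Int × Int) → List (String × Int × Int)
  | _, [], acc => acc
  | 0, queue, acc => acc ++ queue        -- fuel exhausted: the list as built (unreachable under Pre_)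
  | fuel+1, i :: rest, acc =>
      let children := genes.foldl
        (fun cs x => if x.2.1 = i.2.2 then cs ++ [(i.1 ++ "_" ++ x.1, i.2.1, x.2.2)] else cs) []
      goA genes fuel (rest ++ children) (acc ++ [i])

def find_proteins (genes : List (String × Int × Int)) : List (String × Int × Int) :=
  let protein_list := genes.foldl (fun l g => l ++ [g]) []
  goA genes ((genes.length + 1) ^ (genes.length + 2)) protein_list []

-- ===== PORT B =====
-- one round of Source B's while-loop: the comprehension building the next frontier
def chainStep (genes fr : List (String × Int × Int)) : List (String × Int × Int) :=
  fr.flatMap (fun i => genes.filterMap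
    (fun x => if x.2.1 = i.2.2 then some (i.1 ++ "_" ++ x.1, i.2.1, x.2.2) else none))

-- the while-loop, one fuel per round; n+1 rounds are proved sufficient under Pre_
def goB (genes : List (String × Int × Int)) :
    Nat → List (String × Int × Int) → List (String × Int × Int)
  | _, [] => []
  | 0, _ => []                           -- fuel exhausted (unreachable under Pre_)
  | f+1, fr => let nf := chainStep genes fr
               nf ++ goB genes f nf

def find_proteins_alt (genes : List (String × Int × Int)) : List (String × Int × Int) :=
  genes ++ goB genes (genes.length + 1) genes

-- ===== PRECONDITION & SPEC =====
-- the end-coordinate graph of the input: from end value e one reaches x.end for every gene x with x.start = e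
def succVals (genes : List (String × Int × Int)) (e : Int) : List Int :=
  genes.filterMap (fun x => if x.2.1 = e then some x.2.2 else none)
def stepVals (genes : List (String × Int × Int)) (E : List Int) : List Int :=
  (E.flatMap (succVals genes)).dedup
def frontierVals (genes : List (String × Int × Int)) : Nat → List Int
  | 0 => (genes.map (fun g => g.2.2)).dedup
  | k+1 => stepVals genes (frontierVals genes k)

-- A (and B) return on an input iff the chain process dies out; on the remaining (cyclic)
-- inputs A loops forever and returns NOTHING, so Pre_ excludes exactly those.  Pre_ is
-- stated on the input's end-coordinate graph: no end value is still reachable after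
-- n+1 steps (equivalently, the graph has no reachable cycle — by pigeonhole a value
-- reachable after n+1 steps lies on a cycle, since there are at most n distinct ends).
def Pre_find_proteins (genes : List (String × Int × Int)) : Prop :=
  frontierVals genes (genes.length + 1) = []
instance (genes : List (String × Int × Int)) : Decidable (Pre_find_proteins genes) := by
  unfold Pre_find_proteins; infer_instance

def pvWitness_find_proteins : (List (String × Int × Int)) := [("a", 1, 2), ("b", 2, 3)]

def Spec_find_proteins (genes : List (String × Int × Int)) (out : List (String × Int × Int)) : Prop := out = find_proteins_alt genes
instance (genes : List (String × Int × Int)) (out : List (String × Int × Int)) : Decidable (Spec_find_proteins genes out) := by unfold Spec_find_proteins; infer_instance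

-- ===== CLAIM (what is proved, stated in full; the proofs are below) =====
def Claim_equal_find_proteins : Prop := ∀ (genes : List (String × Int × Int)), Dom_find_proteins genes → Pre_find_proteins genes → Spec_find_proteins genes (find_proteins genes)

-- ===== LEMMAS AND PROOFS =====

-- k-fold iteration of one expansion round
def iterE (genes : List (String × Int × Int)) : Nat → List (String × Int × Int) → List (String × Int × Int)
  | 0, q => q
  | k+1, q => chainStep genes (iterE genes k q)

-- levels emitted after a frontier q, with a round budget (proof-side twin of goB without the early stop)
def lvls (genes : List (String × Int × Int)) : Nat → List (String × Int × Int) → List (String × Int × Int)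
  | 0, _ => []
  | m+1, q => chainStep genes q ++ lvls genes m (chainStep genes q)

-- total number of elements processed in m rounds starting from queue q
def totE (genes : List (String × Int × Int)) : Nat → List (String × Int × Int) → Nat
  | 0, _ => 0
  | m+1, q => q.length + totE genes m (chainStep genes q)

theorem chainStep_append (genes a b : List (String × Int × Int)) :
    chainStep genes (a ++ b) = chainStep genes a ++ chainStep genes b := by
  simp [chainStep]

theorem chainStep_nil (genes : List (String × Int × Int)) : chainStep genes [] = [] := rfl

theorem iterE_succ' (genes : List (String × Int × Int)) (k : Nat) (q : List (String × Int × Int)) :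
    iterE genes (k+1) q = iterE genes k (chainStep genes q) := by
  induction k generalizing q with
  | zero => rfl
  | succ k ih => show chainStep genes (iterE genes (k+1) q) = _
                 rw [ih]; rfl

theorem iterE_append (genes : List (String × Int × Int)) (k : Nat) (a b : List (String × Int × Int)) :
    iterE genes k (a ++ b) = iterE genes k a ++ iterE genes k b := by
  induction k with
  | zero => rfl
  | succ k ih => show chainStep genes (iterE genes k (a ++ b)) = _
                 rw [ih, chainStep_append]; rfl

theorem lvls_nil (genes : List (String × Int × Int)) (m : Nat) : lvls genes m [] = [] := by
  induction m with
  | zero => rfl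
  | succ m ih => show chainStep genes [] ++ lvls genes m (chainStep genes []) = []
                 rw [chainStep_nil, ih]; rfl

theorem totE_append (genes : List (String × Int × Int)) (m : Nat) (a b : List (String × Int × Int)) :
    totE genes m (a ++ b) = totE genes m a + totE genes m b := by
  induction m generalizing a b with
  | zero => rfl
  | succ m ih =>
      show (a ++ b).length + totE genes m (chainStep genes (a ++ b)) = _
      rw [chainStep_append, ih]
      simp [totE]; omega

theorem totE_dead (genes : List (String × Int × Int)) (m : Nat) (q : List (String × Int × Int))
    (h : iterE genes m q = []) : totE genes (m+1) q = totE genes m q := by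
  induction m generalizing q with
  | zero => subst h; rfl
  | succ m ih =>
      have h' : iterE genes m (chainStep genes q) = [] := by
        rw [← iterE_succ']; exact h
      show q.length + totE genes (m+1) (chainStep genes q) = q.length + totE genes m (chainStep genes q)
      rw [ih _ h']

-- the queue/level interchange identity
theorem star (genes : List (String × Int × Int)) :
    ∀ (m : Nat) (a b : List (String × Int × Int)), iterE genes m (a ++ b) = [] →
      chainStep genes a ++ lvls genes m (b ++ chainStep genes a) = lvls genes m (a ++ b) := by
  intro m
  induction m with
  | zero =>
      intro a b h
      have ha : a = [] := by
        have := List.append_eq_nil_iff.mp h; exact this.1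
      subst ha
      simp [chainStep_nil, lvls]
  | succ t ih =>
      intro a b h
      have h' : iterE genes t (chainStep genes a ++ chainStep genes b) = [] := by
        rw [← chainStep_append, ← iterE_succ']; exact h
      have ihs := ih (chainStep genes a) (chainStep genes b) h'
      show chainStep genes a ++ (chainStep genes (b ++ chainStep genes a) ++
            lvls genes t (chainStep genes (b ++ chainStep genes a))) =
          chainStep genes (a ++ b) ++ lvls genes t (chainStep genes (a ++ b))
      rw [chainStep_append, chainStep_append]
      calc chainStep genes a ++ ((chainStep genes b ++ chainStep genes (chainStep genes a)) ++
            lvls genes t (chainStep genes b ++ chainStep genes (chainStep genes a)))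
          = (chainStep genes a ++ chainStep genes b) ++
            (chainStep genes (chainStep genes a) ++
              lvls genes t (chainStep genes b ++ chainStep genes (chainStep genes a))) := by
            simp [List.append_assoc]
        _ = (chainStep genes a ++ chainStep genes b) ++
            lvls genes t (chainStep genes a ++ chainStep genes b) := by rw [ihs]

-- A's inner for-loop over genes builds exactly one chainStep round of a singleton
theorem foldl_children (genes : List (String × Int × Int)) (i : String × Int × Int) :
    ∀ init, genes.foldl
      (fun cs x => if x.2.1 = i.2.2 then cs ++ [(i.1 ++ "_" ++ x.1, i.2.1, x.2.2)] else cs) init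
      = init ++ genes.filterMap
          (fun x => if x.2.1 = i.2.2 then some (i.1 ++ "_" ++ x.1, i.2.1, x.2.2) else none) := by
  induction genes with
  | nil => intro init; simp
  | cons g gs ih =>
      intro init
      by_cases h : g.2.1 = i.2.2 <;> simp [h, ih, List.append_assoc]

theorem chainStep_singleton (genes : List (String × Int × Int)) (i : String × Int × Int) :
    chainStep genes [i] = genes.filterMap
      (fun x => if x.2.1 = i.2.2 then some (i.1 ++ "_" ++ x.1, i.2.1, x.2.2) else none) := by
  simp [chainStep]

theorem copy_foldl (genes : List (String × Int × Int)) :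
    ∀ init, genes.foldl (fun l g => l ++ [g]) init = init ++ genes := by
  induction genes with
  | nil => intro init; simp
  | cons g gs ih => intro init; simp [ih]

-- main queue lemma: with a dead level bound m and enough fuel, A's queue run
-- produces exactly the level decomposition
theorem goA_eq (genes : List (String × Int × Int)) :
    ∀ (f : Nat) (q acc : List (String × Int × Int)) (m : Nat),
      iterE genes m q = [] → totE genes m q ≤ f →
      goA genes f q acc = acc ++ q ++ lvls genes m q := by
  intro f
  induction f with
  | zero =>
      intro q acc m hdead hfuel
      match q, m with
      | [], m => simp [goA, lvls_nil]
      | i :: rest, 0 => simp [iterE] at hdead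
      | i :: rest, m+1 => simp [totE] at hfuel
  | succ f ih =>
      intro q acc m hdead hfuel
      match q, m with
      | [], m => simp [goA, lvls_nil]
      | i :: rest, 0 => simp [iterE] at hdead
      | i :: rest, t+1 =>
        have hsplit : chainStep genes (i :: rest) = chainStep genes [i] ++ chainStep genes rest := by
          rw [show (i :: rest) = [i] ++ rest from rfl, chainStep_append]
        have hi : iterE genes (t+1) [i] = [] := by
          have := iterE_append genes (t+1) [i] rest
          rw [show ([i] ++ rest) = i :: rest from rfl, hdead] at this
          exact (List.append_eq_nil_iff.mp this.symm).1
        have hr : iterE genes (t+1) rest = [] := by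
          have := iterE_append genes (t+1) [i] rest
          rw [show ([i] ++ rest) = i :: rest from rfl, hdead] at this
          exact (List.append_eq_nil_iff.mp this.symm).2
        have h2 : iterE genes (t+1+1) [i] = [] := by
          show chainStep genes (iterE genes (t+1) [i]) = []
          rw [hi]; rfl
        have hci : iterE genes (t+1) (chainStep genes [i]) = [] := by
          rw [← iterE_succ' genes (t+1) [i]]; exact h2
        have hdead' : iterE genes (t+1) (rest ++ chainStep genes [i]) = [] := by
          rw [iterE_append, hr, hci]; rfl
        have htoti : iterE genes t (chainStep genes [i]) = [] := by
          rw [← iterE_succ']; exact hi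
        have htot_eq : totE genes (t+1) (rest ++ chainStep genes [i]) + 1 = totE genes (t+1) (i :: rest) := by
          rw [totE_append]
          have h1 : totE genes (t+1) (chainStep genes [i]) = totE genes t (chainStep genes [i]) :=
            totE_dead genes t _ htoti
          show totE genes (t+1) rest + totE genes (t+1) (chainStep genes [i]) + 1 = _
          rw [h1]
          show _ = (i :: rest).length + totE genes t (chainStep genes (i :: rest))
          rw [hsplit, totE_append]
          simp [totE, List.length_cons]; omega
        have hfuel' : totE genes (t+1) (rest ++ chainStep genes [i]) ≤ f := by
          have : totE genes (t+1) (i :: rest) ≤ f + 1 := hfuel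
          omega
        have ihx := ih (rest ++ chainStep genes [i]) (acc ++ [i]) (t+1) hdead' hfuel'
        have hgo : goA genes (f+1) (i :: rest) acc
            = goA genes f (rest ++ chainStep genes [i]) (acc ++ [i]) := by
          show goA genes f (rest ++ genes.foldl _ []) (acc ++ [i]) = _
          rw [foldl_children, chainStep_singleton]
          simp
        rw [hgo, ihx]
        have hstar := star genes (t+1) [i] rest (by simpa using hdead)
        calc (acc ++ [i]) ++ (rest ++ chainStep genes [i]) ++ lvls genes (t+1) (rest ++ chainStep genes [i])
            = acc ++ [i] ++ rest ++ (chainStep genes [i] ++ lvls genes (t+1) (rest ++ chainStep genes [i])) := by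
              simp [List.append_assoc]
          _ = acc ++ [i] ++ rest ++ lvls genes (t+1) ([i] ++ rest) := by rw [hstar]
          _ = acc ++ (i :: rest) ++ lvls genes (t+1) (i :: rest) := by simp

theorem goB_eq_lvls (genes : List (String × Int × Int)) :
    ∀ (f : Nat) (q : List (String × Int × Int)), goB genes f q = lvls genes f q := by
  intro f
  induction f with
  | zero => intro q; cases q <;> rfl
  | succ f ih =>
      intro q
      cases q with
      | nil => rw [lvls_nil]; rfl
      | cons i rest =>
          show chainStep genes (i :: rest) ++ goB genes f (chainStep genes (i :: rest)) = _
          rw [ih]; rfl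

-- every level-k protein's end value lies in the k-th value frontier
theorem ends_in_frontiers (genes : List (String × Int × Int)) :
    ∀ (k : Nat) (j : String × Int × Int), j ∈ iterE genes k genes →
      j.2.2 ∈ frontierVals genes k := by
  intro k
  induction k with
  | zero =>
      intro j hj
      simp only [frontierVals, List.mem_dedup]
      exact List.mem_map.mpr ⟨j, hj, rfl⟩
  | succ k ih =>
      intro j hj
      have hj' : j ∈ chainStep genes (iterE genes k genes) := hj
      rw [chainStep, List.mem_flatMap] at hj'
      obtain ⟨i, hi, hjx⟩ := hj'
      rw [List.mem_filterMap] at hjx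
      obtain ⟨x, hx, hxe⟩ := hjx
      by_cases hmatch : x.2.1 = i.2.2
      · simp [hmatch] at hxe
        subst hxe
        show x.2.2 ∈ stepVals genes (frontierVals genes k)
        simp only [stepVals, List.mem_dedup, List.mem_flatMap]
        exact ⟨i.2.2, ih i hi, by
          simp only [succVals, List.mem_filterMap]
          exact ⟨x, hx, by simp [hmatch]⟩⟩
      · simp [hmatch] at hxe

theorem pre_dead (genes : List (String × Int × Int)) (hpre : Pre_find_proteins genes) :
    iterE genes (genes.length + 1) genes = [] := by
  rw [List.eq_nil_iff_forall_not_mem]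
  intro j hj
  have := ends_in_frontiers genes (genes.length + 1) j hj
  rw [hpre] at this
  cases this

theorem length_chainStep_le (genes : List (String × Int × Int)) (q : List (String × Int × Int)) :
    (chainStep genes q).length ≤ genes.length * q.length := by
  induction q with
  | nil => simp [chainStep]
  | cons i rest ih =>
      have h1 : chainStep genes (i :: rest) = chainStep genes [i] ++ chainStep genes rest := by
        rw [show (i :: rest) = [i] ++ rest from rfl, chainStep_append]
      rw [h1]
      have h2 : (chainStep genes [i]).length ≤ genes.length := by
        rw [chainStep_singleton]; exact List.length_filterMap_le _ _
      simp [List.length_append]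
      calc (chainStep genes [i]).length + (chainStep genes rest).length
          ≤ genes.length + genes.length * rest.length := Nat.add_le_add h2 ih
        _ = genes.length * (rest.length + 1) := by ring
        _ = genes.length * (i :: rest).length := by simp

theorem totE_le_pow (genes : List (String × Int × Int)) :
    ∀ (m : Nat) (q : List (String × Int × Int)),
      totE genes m q ≤ (genes.length + 1) ^ m * q.length := by
  intro m
  induction m with
  | zero => intro q; simp [totE]
  | succ m ih =>
      intro q
      have h1 := ih (chainStep genes q)
      have h2 := length_chainStep_le genes q
      have h3 : totE genes (m+1) q = q.length + totE genes m (chainStep genes q) := rfl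
      have h4 : (genes.length + 1) ^ m * (chainStep genes q).length
          ≤ (genes.length + 1) ^ m * (genes.length * q.length) :=
        Nat.mul_le_mul_left _ h2
      have h5 : (1 : Nat) ≤ (genes.length + 1) ^ m := Nat.one_le_pow _ _ (by omega)
      have h6 : (genes.length + 1) ^ (m+1) = (genes.length + 1) ^ m * (genes.length + 1) := pow_succ _ _
      calc totE genes (m+1) q
          ≤ q.length + (genes.length + 1) ^ m * (genes.length * q.length) := by
            rw [h3]; exact Nat.add_le_add_left (le_trans h1 h4) _
        _ ≤ (genes.length + 1) ^ m * q.length + (genes.length + 1) ^ m * (genes.length * q.length) := by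
            have : q.length ≤ (genes.length + 1) ^ m * q.length := Nat.le_mul_of_pos_left _ (by omega)
            omega
        _ = (genes.length + 1) ^ (m+1) * q.length := by rw [h6]; ring

-- ===== VERDICT (by name: the statement is the Claim_ definition above) =====
theorem find_proteins_spec : Claim_equal_find_proteins := by
  intro genes _hdom hpre
  unfold Spec_find_proteins find_proteins find_proteins_alt
  rw [copy_foldl genes []]
  simp only [List.nil_append]
  have hdead := pre_dead genes hpre
  have hfuel : totE genes (genes.length + 1) genes ≤ (genes.length + 1) ^ (genes.length + 2) := by
    have h1 := totE_le_pow genes (genes.length + 1) genes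
    have h2 : (genes.length + 1) ^ (genes.length + 1) * genes.length
        ≤ (genes.length + 1) ^ (genes.length + 1) * (genes.length + 1) :=
      Nat.mul_le_mul_left _ (by omega)
    have h3 : (genes.length + 1) ^ (genes.length + 2)
        = (genes.length + 1) ^ (genes.length + 1) * (genes.length + 1) := pow_succ _ _
    omega
  rw [goA_eq genes _ genes [] (genes.length + 1) hdead hfuel]
  rw [goB_eq_lvls genes (genes.length + 1) genes]
  simp
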